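-- pv_equiv track=rewrite | github.com/jsdylhw/Advent_of_Code_2024 | Day5/day5_2.py | is_update_in_correct_order
-- ===== SOURCE A (Python) =====
-- def is_update_in_correct_order(update, rules):
--     # 将更新中的页面及其所在位置记录下来
--     position = {page: i for i, page in enumerate(update)}
--     update_pages = set(update)
--
--     # 检查规则
--     for x, y in rules:
--         if x in update_pages and y in update_pages:
--             # 若有 X|Y 的规则，需保证在更新中 X 出现位置在 Y 之前
--             if position[x] >= position[y]:
--                 return False
--     return True
-- ===== SOURCE B (Python) =====
-- def is_update_in_correct_order(update, rules):
--     # Same position map (last occurrence wins, like A's dict comprehension).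
--     position = {page: i for i, page in enumerate(update)}
--     # Index the rules by their successor page once.
--     predecessors = {}
--     for x, y in rules:
--         predecessors.setdefault(y, []).append(x)
--     # Page-driven pass: for each page of the update, check all its rule predecessors.
--     for y, p in position.items():
--         for x in predecessors.get(y, []):
--             if x in position and position[x] >= p:
--                 return False
--     return True
-- ===== Notes on version B (the rewrite author's own statement) =====
-- stated objective: alternative
-- what changed: Instead of scanning the rule list and testing both endpoints against a set of pages, B builds an index of rules keyed by successor page and drives the check from the update's position dict, checking each page's predecessors against the position map.
import Mathlib
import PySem

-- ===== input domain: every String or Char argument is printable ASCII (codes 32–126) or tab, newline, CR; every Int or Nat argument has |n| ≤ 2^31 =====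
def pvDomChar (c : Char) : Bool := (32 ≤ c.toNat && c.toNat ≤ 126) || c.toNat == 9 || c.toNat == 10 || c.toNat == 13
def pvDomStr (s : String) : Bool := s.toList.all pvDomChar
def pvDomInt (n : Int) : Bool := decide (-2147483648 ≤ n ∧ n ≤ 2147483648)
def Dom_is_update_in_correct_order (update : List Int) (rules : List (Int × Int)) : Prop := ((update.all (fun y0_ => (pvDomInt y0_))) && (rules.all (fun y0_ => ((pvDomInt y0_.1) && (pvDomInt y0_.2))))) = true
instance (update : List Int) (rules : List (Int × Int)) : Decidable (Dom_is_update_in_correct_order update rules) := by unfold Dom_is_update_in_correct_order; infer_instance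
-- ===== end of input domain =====

-- B re-shapes A's rule scan into an index of rules keyed by successor page plus a
-- page-driven pass over the position dict; same return value on every input.

-- ===== PORT A =====
-- the 'for x, y in rules' loop with its early 'return False'
def pvALoop (position : PySem.Dict Int Int) (pages : PySem.Set Int) : List (Int × Int) → Bool
  | [] => true
  | (x, y) :: rest =>
    if pages.contains x && pages.contains y then
      -- position[x] / position[y]: the key is always present when the membership test
      -- succeeded (position's keys are exactly update's pages), so getD 0 is exact here
      if (position.get? x).getD 0 ≥ (position.get? y).getD 0 then false
      else pvALoop position pages rest
    else pvALoop position pages rest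

def is_update_in_correct_order (update : List Int) (rules : List (Int × Int)) : Bool :=
  let position : PySem.Dict Int Int :=
    (PySem.List.enumerate update).foldl (fun d p => d.insert p.2 p.1) PySem.Dict.empty
  let update_pages : PySem.Set Int := PySem.Set.ofList update
  pvALoop position update_pages rules

-- ===== PORT B =====
-- inner 'for x in predecessors.get(y, [])' loop with its early 'return False'
def pvBInner (position : PySem.Dict Int Int) (p : Int) : List Int → Bool
  | [] => true
  | x :: xs =>
    if position.contains x && (position.get? x).getD 0 ≥ p then false
    else pvBInner position p xs

-- outer 'for y, p in position.items()' loop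
def pvBOuter (position : PySem.Dict Int Int) (preds : PySem.Dict Int (List Int)) :
    List (Int × Int) → Bool
  | [] => true
  | (y, p) :: rest =>
    if pvBInner position p (preds.getD y []) then pvBOuter position preds rest else false

def is_update_in_correct_order_alt (update : List Int) (rules : List (Int × Int)) : Bool :=
  let position : PySem.Dict Int Int :=
    (PySem.List.enumerate update).foldl (fun d p => d.insert p.2 p.1) PySem.Dict.empty
  -- predecessors.setdefault(y, []).append(x)
  let predecessors : PySem.Dict Int (List Int) :=
    rules.foldl (fun d r => d.modify r.2 [] (· ++ [r.1])) PySem.Dict.empty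
  pvBOuter position predecessors position.items

-- ===== PRECONDITION & SPEC =====
def Spec_is_update_in_correct_order (update : List Int) (rules : List (Int × Int)) (out : Bool) : Prop := out = is_update_in_correct_order_alt update rules
instance (update : List Int) (rules : List (Int × Int)) (out : Bool) : Decidable (Spec_is_update_in_correct_order update rules out) := by unfold Spec_is_update_in_correct_order; infer_instance

-- ===== CLAIM (what is proved, stated in full; the proofs are below) =====
def Claim_equal_is_update_in_correct_order : Prop := ∀ (update : List Int) (rules : List (Int × Int)), Dom_is_update_in_correct_order update rules → Spec_is_update_in_correct_order update rules (is_update_in_correct_order update rules)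

-- ===== LEMMAS AND PROOFS =====

-- proof-only abbreviations for the two dicts both ports build
def pvPosDict (update : List Int) : PySem.Dict Int Int :=
  (PySem.List.enumerate update).foldl (fun d p => d.insert p.2 p.1) PySem.Dict.empty

def pvPredsDict (rules : List (Int × Int)) : PySem.Dict Int (List Int) :=
  rules.foldl (fun d r => d.modify r.2 [] (· ++ [r.1])) PySem.Dict.empty

theorem pvALoop_eq_all (position : PySem.Dict Int Int) (pages : PySem.Set Int)
    (rules : List (Int × Int)) :
    pvALoop position pages rules =
      rules.all (fun r => !((pages.contains r.1 && pages.contains r.2) &&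
        decide ((position.get? r.1).getD 0 ≥ (position.get? r.2).getD 0))) := by
  induction rules with
  | nil => rfl
  | cons r rest ih =>
    obtain ⟨x, y⟩ := r
    simp only [pvALoop, List.all_cons, ih]
    by_cases h1 : (pages.contains x && pages.contains y) = true
    · obtain ⟨hx, hy⟩ := Bool.and_eq_true_iff.mp h1
      by_cases h2 : (position.get? x).getD 0 ≥ (position.get? y).getD 0 <;>
        simp [(PySem.Set.contains_iff pages x).mp hx, (PySem.Set.contains_iff pages y).mp hy, h2]
    · rw [Bool.and_eq_true_iff, PySem.Set.contains_iff pages x, PySem.Set.contains_iff pages y] at h1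
      by_cases hx : x ∈ pages
      · have hy : y ∉ pages := fun hy => h1 ⟨hx, hy⟩
        simp [hx, hy]
      · simp [hx]

theorem pvBInner_eq_all (position : PySem.Dict Int Int) (p : Int) (l : List Int) :
    pvBInner position p l =
      l.all (fun x => !(position.contains x && decide ((position.get? x).getD 0 ≥ p))) := by
  induction l with
  | nil => rfl
  | cons x xs ih =>
    simp only [pvBInner, List.all_cons, ih]
    by_cases h : (position.contains x && decide ((position.get? x).getD 0 ≥ p)) = true
    · simp [h]
    · rw [Bool.not_eq_true] at h
      simp [h]

theorem pvBOuter_eq_all (position : PySem.Dict Int Int) (preds : PySem.Dict Int (List Int))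
    (items : List (Int × Int)) :
    pvBOuter position preds items =
      items.all (fun q => pvBInner position q.2 (preds.getD q.1 [])) := by
  induction items with
  | nil => rfl
  | cons q rest ih =>
    obtain ⟨y, p⟩ := q
    simp only [pvBOuter, List.all_cons, ih]
    by_cases h : pvBInner position p (preds.getD y []) <;> simp [h]

-- the predecessors index lists exactly the rule sources for each successor page
theorem getD_predLoop (l : List (Int × Int)) (d : PySem.Dict Int (List Int)) (c : Int) :
    (l.foldl (fun d r => d.modify r.2 [] (· ++ [r.1])) d).getD c [] =
      d.getD c [] ++ (l.filter (fun r => r.2 == c)).map (·.1) := by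
  induction l generalizing d with
  | nil => simp
  | cons r rest ih =>
    obtain ⟨a, b⟩ := r
    simp only [List.foldl_cons, ih, List.filter_cons]
    rw [PySem.Dict.getD_modify]
    by_cases h : c = b
    · subst h; simp
    · simp [h, Ne.symm h]

theorem mem_predecessors (rules : List (Int × Int)) (x y : Int) :
    x ∈ (pvPredsDict rules).getD y [] ↔ (x, y) ∈ rules := by
  unfold pvPredsDict
  rw [getD_predLoop]
  simp only [PySem.Dict.getD_empty, List.nil_append, List.mem_map, List.mem_filter]
  constructor
  · rintro ⟨⟨a, b⟩, ⟨hmem, hb⟩, ha⟩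
    simp at hb ha; subst hb; subst ha; exact hmem
  · intro h; exact ⟨(x, y), ⟨h, by simp⟩, rfl⟩

theorem keys_position (update : List Int) :
    (pvPosDict update).keys = PySem.Set.ofList update := by
  unfold pvPosDict
  rw [PySem.Dict.keys_foldl_insert_key]
  rw [PySem.List.map_snd_enumerate]
  simp [PySem.Dict.keys_empty, PySem.Set.update_nil_left]

theorem nodup_keys_position (update : List Int) : (pvPosDict update).keys.Nodup := by
  rw [keys_position]; exact PySem.Set.nodup_ofList update

theorem mem_keys_position (update : List Int) (x : Int) :
    x ∈ (pvPosDict update).keys ↔ x ∈ update := by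
  rw [keys_position]; exact PySem.Set.mem_ofList update x

theorem pvMainEq (update : List Int) (rules : List (Int × Int)) :
    pvALoop (pvPosDict update) (PySem.Set.ofList update) rules =
      pvBOuter (pvPosDict update) (pvPredsDict rules) (pvPosDict update).items := by
  rw [pvALoop_eq_all, pvBOuter_eq_all]
  have hnd : (pvPosDict update).keys.Nodup := nodup_keys_position update
  have hcontains : ∀ x : Int, (pvPosDict update).contains x = decide (x ∈ update) := by
    intro x
    rw [PySem.Dict.contains_eq_decide_mem_keys]
    simp only [mem_keys_position update x]
  have hpages : ∀ x : Int, (PySem.Set.ofList update).contains x = decide (x ∈ update) := by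
    intro x
    rw [Bool.eq_iff_iff]
    simp [PySem.Set.mem_ofList]
  rw [Bool.eq_iff_iff]
  simp only [List.all_eq_true, Bool.not_eq_true', Bool.and_eq_false_iff, pvBInner_eq_all]
  constructor
  · -- A = true → B = true
    intro hA q hq x hx
    obtain ⟨y, p⟩ := q
    have hrule : (x, y) ∈ rules := (mem_predecessors rules x y).mp hx
    have hy : y ∈ update := (mem_keys_position update y).mp
      (PySem.Dict.mem_keys_of_mem_items _ hq)
    have hgy : (pvPosDict update).get? y = some p := PySem.Dict.get?_of_mem_items _ hq hnd
    have hAxy := hA (x, y) hrule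
    by_cases hcx : (pvPosDict update).contains x = true
    · have hx' : x ∈ update := by
        have := (hcontains x) ▸ hcx; simpa using this
      right
      rcases hAxy with (h | h) | h
      · rw [hpages] at h; simp [hx'] at h
      · rw [hpages] at h; simp [hy] at h
      · simpa [hgy] using h
    · left; simpa using hcx
  · -- B = true → A = true
    intro hB r hr
    obtain ⟨x, y⟩ := r
    simp only [hpages]
    by_cases hy : y ∈ update
    · by_cases hx : x ∈ update
      · have hyk : y ∈ (pvPosDict update).keys := (mem_keys_position update y).mpr hy
        obtain ⟨p, hitem⟩ : ∃ p, (y, p) ∈ (pvPosDict update).items := by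
          simp only [PySem.Dict.keys, List.mem_map] at hyk
          obtain ⟨⟨a, b⟩, hab, hfst⟩ := hyk
          simp only at hfst
          subst hfst
          exact ⟨b, hab⟩
        have hgy : (pvPosDict update).get? y = some p := PySem.Dict.get?_of_mem_items _ hitem hnd
        have hxin : x ∈ (pvPredsDict rules).getD y [] := (mem_predecessors rules x y).mpr hr
        have hBx := hB (y, p) hitem x hxin
        rcases hBx with h | h
        · rw [hcontains] at h; simp [hx] at h
        · right; simpa [hgy] using h
      · exact Or.inl (Or.inl (by simp [hx]))
    · exact Or.inl (Or.inr (by simp [hy]))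

-- ===== VERDICT (by name: the statement is the Claim_ definition above) =====
theorem is_update_in_correct_order_spec : Claim_equal_is_update_in_correct_order := by
  intro update rules _
  show is_update_in_correct_order update rules = is_update_in_correct_order_alt update rules
  exact pvMainEq update rules
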